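-- pv_equiv track=rewrite | github.com/Liujia127/PLC-Transition-Sequence | huafen/beifen.py | partition
-- ===== SOURCE A (Python) =====
-- def partition(array1, string1):
--     i = 0
--     array2 = []
--     while i < len(input_str2):
--         found = False
--         for substring in array1:
--             if input_str2[i:i + len(substring)] == substring:
--                 array2.append(substring)
--                 i += len(substring)
--                 found = True
--                 break
--         if not found:
--             # 如果没有找到匹配的子串，将当前字符单独添加到B中
--             array2.append(input_str2[i])
--             i += 1
--     return array2
--
-- input_str2 = "abcdeafghidjkleafgcmdnkoeafgcijdkleafghidjkleafghmndkoeafghmndkoeafgcmndkoeafghidjkleafghmndkoeafghmndkoeafgcmndkoeafghijdkleafgcmdnkoeafghijdkleafgcmndkoeafgcijdkleafghijdkleafghmndkoeafghmndkoeafgcmndkoeafghijdkleafghmndkoeafghmdnkoeafgcmndkoeafghijdkleafgcmndkoeafghijdkleafgcmdnkoeafgcijdkl"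
--
-- i = 0
-- ===== SOURCE B (Python) =====
-- input_str2 = "abcdeafghidjkleafgcmdnkoeafgcijdkleafghidjkleafghmndkoeafghmndkoeafgcmndkoeafghidjkleafghmndkoeafghmndkoeafgcmndkoeafghijdkleafgcmdnkoeafghijdkleafgcmndkoeafgcijdkleafghijdkleafghmndkoeafghmndkoeafgcmndkoeafghijdkleafghmndkoeafghmdnkoeafgcmndkoeafghijdkleafgcmndkoeafghijdkleafgcmdnkoeafgcijdkl"
--
-- def partition(array1, string1):
--     # index each distinct substring by its first (priority) position, once
--     pri = {}
--     for idx, s in enumerate(array1):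
--         if s not in pri:
--             pri[s] = idx
--     lengths = sorted(set(len(s) for s in array1))
--     n = len(input_str2)
--     out = []
--     i = 0
--     while i < n:
--         best = None
--         for L in lengths:
--             if i + L <= n:
--                 cand = input_str2[i:i + L]
--                 j = pri.get(cand)
--                 if j is not None and (best is None or j < best[0]):
--                     best = (j, cand)
--         if best is None:
--             out.append(input_str2[i])
--             i += 1
--         else:
--             out.append(best[1])
--             i += len(best[1])
--     return out
-- ===== Notes on version B (the rewrite author's own statement) =====
-- stated objective: faster
-- what changed: Instead of rescanning all of array1 at every position, B builds a first-index dictionary over array1 once and at each position probes only the distinct substring lengths, picking the minimum-priority match (which equals A's first-in-array1 match).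
import Mathlib
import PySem

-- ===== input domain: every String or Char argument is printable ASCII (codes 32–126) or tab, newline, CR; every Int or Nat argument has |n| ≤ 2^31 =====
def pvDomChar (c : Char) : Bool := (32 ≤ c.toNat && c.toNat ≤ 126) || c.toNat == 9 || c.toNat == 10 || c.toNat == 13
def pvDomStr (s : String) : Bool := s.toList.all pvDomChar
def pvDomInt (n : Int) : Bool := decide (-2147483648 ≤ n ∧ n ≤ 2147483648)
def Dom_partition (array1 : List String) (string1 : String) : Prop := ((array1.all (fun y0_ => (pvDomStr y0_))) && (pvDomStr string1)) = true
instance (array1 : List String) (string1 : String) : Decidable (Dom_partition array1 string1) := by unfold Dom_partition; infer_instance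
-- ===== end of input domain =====

-- B replaces A's per-position scan of all of array1 by a first-index dictionary over array1
-- plus one probe per distinct substring length (minimum-priority match); return values only —
-- both programs ignore string1 and tokenize the module constant input_str2, and B reproduces that.

-- ===== PORT A =====
-- the module-level constant input_str2 (as its character list)
def pvInput2 : List Char := ("abcdeafghidjkleafgcmdnkoeafgcijdkleafghidjkleafghmndkoeafghmndkoeafgcmndkoeafghidjkleafghmndkoeafghmndkoeafgcmndkoeafghijdkleafgcmdnkoeafghijdkleafgcmndkoeafgcijdkleafghijdkleafghmndkoeafghmndkoeafgcmndkoeafghijdkleafghmndkoeafghmdnkoeafgcmndkoeafghijdkleafgcmndkoeafghijdkleafgcmdnkoeafgcijdkl").toList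

-- the inner 'for substring in array1 … break': first element matching at i
-- (input_str2[i:i+len(t)] with 0 ≤ i is exactly (drop i).take len(t))
def pvFindA (s : List Char) (i : Nat) : List String → Option String
  | [] => none
  | t :: rest => if (s.drop i).take t.length = t.toList then some t else pvFindA s i rest

-- the while-loop; fuel = s.length bounds the iterations (each iteration advances i by ≥ 1
-- whenever "" ∉ array1; when "" ∈ array1 the Python almost always diverges, and the two
-- fuelled ports still step identically, so the proved equality is unconditional)
def pvLoopA (array1 : List String) (s : List Char) : Nat → Nat → List String
  | 0, _ => []
  | fuel+1, i =>
    if i < s.length then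
      match pvFindA s i array1 with
      | some t => t :: pvLoopA array1 s fuel (i + t.length)
      | none => String.ofList ((s.drop i).take 1) :: pvLoopA array1 s fuel (i + 1)
    else []

def partition (array1 : List String) (string1 : String) : List String :=
  pvLoopA array1 pvInput2 pvInput2.length 0

-- ===== PORT B =====
-- 'for idx, s in enumerate(array1): if s not in pri: pri[s] = idx'
def pvBuildPri : List String → Nat → PySem.Dict String Nat → PySem.Dict String Nat
  | [], _, d => d
  | t :: rest, idx, d => pvBuildPri rest (idx + 1) (if d.contains t then d else d.insert t idx)

-- 'sorted(set(len(s) for s in array1))'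
def pvLengths (array1 : List String) : List Nat :=
  PySem.List.sorted (PySem.Set.ofList (array1.map String.length)) (fun x => x) false

-- the inner 'for L in lengths' accumulating the minimum-priority match (j, cand)
def pvBestB (pri : PySem.Dict String Nat) (s : List Char) (n i : Nat) :
    List Nat → Option (Nat × String) → Option (Nat × String)
  | [], best => best
  | L :: rest, best =>
    if i + L ≤ n then
      match pri.get? (String.ofList ((s.drop i).take L)) with
      | some j =>
        match best with
        | none => pvBestB pri s n i rest (some (j, String.ofList ((s.drop i).take L)))
        | some b =>
          if j < b.1 then pvBestB pri s n i rest (some (j, String.ofList ((s.drop i).take L)))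
          else pvBestB pri s n i rest best
      | none => pvBestB pri s n i rest best
    else pvBestB pri s n i rest best

-- the while-loop of B (same fuel convention as A's port)
def pvLoopB (pri : PySem.Dict String Nat) (lengths : List Nat) (s : List Char) : Nat → Nat → List String
  | 0, _ => []
  | fuel+1, i =>
    if i < s.length then
      match pvBestB pri s s.length i lengths none with
      | some b => b.2 :: pvLoopB pri lengths s fuel (i + b.2.length)
      | none => String.ofList ((s.drop i).take 1) :: pvLoopB pri lengths s fuel (i + 1)
    else []

def partition_alt (array1 : List String) (string1 : String) : List String :=
  pvLoopB (pvBuildPri array1 0 PySem.Dict.empty) (pvLengths array1) pvInput2 pvInput2.length 0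

-- ===== PRECONDITION & SPEC =====
def Spec_partition (array1 : List String) (string1 : String) (out : List String) : Prop := out = partition_alt array1 string1
instance (array1 : List String) (string1 : String) (out : List String) : Decidable (Spec_partition array1 string1 out) := by unfold Spec_partition; infer_instance

-- ===== CLAIM (what is proved, stated in full; the proofs are below) =====
def Claim_equal_partition : Prop := ∀ (array1 : List String) (string1 : String), Dom_partition array1 string1 → Spec_partition array1 string1 (partition array1 string1)

-- ===== LEMMAS AND PROOFS =====

-- the match predicate at position i of s
def pvMatchP (s : List Char) (i : Nat) (t : String) : Bool :=
  decide ((s.drop i).take t.length = t.toList)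

theorem pvFindA_eq_findIdx? (s : List Char) (i : Nat) (l : List String) :
    pvFindA s i l = (l.findIdx? (pvMatchP s i)).bind (fun j => l[j]?) := by
  induction l with
  | nil => rfl
  | cons t rest ih =>
    by_cases h : (s.drop i).take t.length = t.toList
    · simp [pvFindA, h, List.findIdx?_cons, pvMatchP]
    · simp only [pvFindA, h, if_false, List.findIdx?_cons, pvMatchP]
      rw [if_neg (by simpa using h)]
      rw [ih]
      cases rest.findIdx? (pvMatchP s i) <;> simp

theorem pvBuildPri_get? (l : List String) (idx : Nat) (d : PySem.Dict String Nat) (c : String) :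
    (pvBuildPri l idx d).get? c
      = ((d.get? c).or ((l.findIdx? (fun t => t == c)).map (· + idx))) := by
  induction l generalizing idx d with
  | nil => cases h : d.get? c <;> simp [pvBuildPri, h]
  | cons t rest ih =>
    rw [pvBuildPri, ih, List.findIdx?_cons]
    by_cases hc : t = c
    · subst hc
      simp only [beq_self_eq_true, if_true]
      by_cases hd : d.contains t
      · rw [if_pos hd]
        rw [PySem.Dict.contains_eq_isSome_get?] at hd
        obtain ⟨v, hv⟩ := Option.isSome_iff_exists.mp hd
        simp [hv]
      · rw [if_neg hd]
        have hnone : d.get? t = none := by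
          rw [PySem.Dict.contains_eq_isSome_get?] at hd
          simpa using hd
        simp [hnone, PySem.Dict.get?_insert_self]
    · have hbeq : (t == c) = false := by simpa using hc
      simp only [hbeq, if_false]
      have hget : (if d.contains t then d else d.insert t idx).get? c = d.get? c := by
        split
        · rfl
        · exact PySem.Dict.get?_insert_of_ne _ _ (fun h => hc h.symm)
      rw [hget]
      cases hdc : d.get? c with
      | some v => simp
      | none =>
        simp only [Option.or]
        cases rest.findIdx? (fun t => t == c) <;> simp [Nat.add_assoc, Nat.add_comm 1 idx]

theorem pvPri_get? (array1 : List String) (c : String) :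
    (pvBuildPri array1 0 PySem.Dict.empty).get? c = array1.findIdx? (fun t => t == c) := by
  rw [pvBuildPri_get?]
  cases array1.findIdx? (fun t => t == c) <;> simp [PySem.Dict.get?_empty]

-- findIdx? characterisation
theorem pvFindIdx?_spec {α : Type} {xs : List α} {p : α → Bool} {j : Nat}
    (h : xs.findIdx? p = some j) :
    ∃ hj : j < xs.length, p (xs[j]'hj) = true ∧ ∀ k (hk : k < j), p (xs[k]'(hk.trans hj)) = false := by
  rw [List.findIdx?_eq_some_iff_findIdx_eq] at h
  obtain ⟨hj, hfi⟩ := h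
  refine ⟨hj, ?_, ?_⟩
  · subst hfi; exact List.findIdx_getElem
  · intro k hk
    subst hfi
    exact List.not_of_lt_findIdx hk

-- a candidate slice of admitted length L is a genuine match
theorem pvSlice_match {s : List Char} {i L : Nat} (hL : i + L ≤ s.length) :
    pvMatchP s i (String.ofList ((s.drop i).take L)) = true := by
  have hlen : (String.ofList ((s.drop i).take L)).length = L := by
    rw [← String.length_toList, String.toList_ofList, List.length_take, List.length_drop]
    omega
  simp [pvMatchP, hlen, String.toList_ofList]

-- a match determines its admitted length and recovers itself as the slice
theorem pvMatch_slice {s : List Char} {i : Nat} {t : String} (hi : i ≤ s.length)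
    (h : pvMatchP s i t = true) :
    i + t.length ≤ s.length ∧ String.ofList ((s.drop i).take t.length) = t := by
  have h' : (s.drop i).take t.length = t.toList := by simpa [pvMatchP] using h
  have hlen : t.toList.length = t.length := String.length_toList
  have hmin : min t.length (s.length - i) = t.length := by
    have := congrArg List.length h'
    rw [List.length_take, List.length_drop] at this
    omega
  refine ⟨by omega, ?_⟩
  rw [h', String.ofList_toList]

-- ### the B-side fold
-- once the winner is the accumulator it stays, provided no candidate beats index j₀
theorem pvBestB_stays (pri : PySem.Dict String Nat) (s : List Char) (n i : Nat)
    (j₀ : Nat) (c₀ : String) :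
    ∀ ls, (∀ L ∈ ls, ∀ j, i + L ≤ n → pri.get? (String.ofList ((s.drop i).take L)) = some j → ¬ j < j₀) →
      pvBestB pri s n i ls (some (j₀, c₀)) = some (j₀, c₀) := by
  intro ls
  induction ls with
  | nil => intro _; rfl
  | cons L rest ih =>
    intro hall
    have hrest := fun L' hm => hall L' (List.mem_cons_of_mem _ hm)
    rw [pvBestB]
    by_cases hLn : i + L ≤ n
    · rw [if_pos hLn]
      cases hg : pri.get? (String.ofList ((s.drop i).take L)) with
      | none => exact ih hrest
      | some j =>
        dsimp only
        rw [if_neg (hall L List.mem_cons_self j hLn hg)]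
        exact ih hrest
    · rw [if_neg hLn]
      exact ih hrest

-- the fold finds the minimum-priority candidate (j₀, c₀)
theorem pvBestB_min (pri : PySem.Dict String Nat) (s : List Char) (n i : Nat)
    (j₀ : Nat) (c₀ : String)
    (hC : ∀ L j, i + L ≤ n → pri.get? (String.ofList ((s.drop i).take L)) = some j →
            j₀ ≤ j ∧ (j = j₀ → String.ofList ((s.drop i).take L) = c₀))
    (hguard : i + c₀.length ≤ n)
    (hcand : pri.get? (String.ofList ((s.drop i).take c₀.length)) = some j₀) :
    ∀ ls best, c₀.length ∈ ls →
      (best = none ∨ ∃ b, best = some b ∧ j₀ ≤ b.1 ∧ (b.1 = j₀ → b = (j₀, c₀))) →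
      pvBestB pri s n i ls best = some (j₀, c₀) := by
  intro ls
  induction ls with
  | nil => intro best hmem _; simp at hmem
  | cons L rest ih =>
    intro best hmem hbest
    have hCnot : ∀ L j, i + L ≤ n → pri.get? (String.ofList ((s.drop i).take L)) = some j → ¬ j < j₀ :=
      fun L j hLn hg => Nat.not_lt.mpr ((hC L j hLn hg).1)
    have hrest : ∀ L' ∈ rest, ∀ j, i + L' ≤ n →
        pri.get? (String.ofList ((s.drop i).take L')) = some j → ¬ j < j₀ :=
      fun L' _ => hCnot L'
    by_cases hLc : L = c₀.length
    · subst hLc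
      rw [pvBestB, if_pos hguard, hcand]
      have hc0 : String.ofList ((s.drop i).take c₀.length) = c₀ := (hC _ _ hguard hcand).2 rfl
      rcases hbest with rfl | ⟨b, rfl, hle, heq⟩
      · dsimp only
        rw [hc0]
        exact pvBestB_stays pri s n i j₀ c₀ rest hrest
      · dsimp only
        by_cases hlt : j₀ < b.1
        · rw [if_pos hlt, hc0]
          exact pvBestB_stays pri s n i j₀ c₀ rest hrest
        · rw [if_neg hlt]
          have hbj : b = (j₀, c₀) := heq (Nat.le_antisymm (Nat.not_lt.mp hlt) hle)
          rw [hbj]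
          exact pvBestB_stays pri s n i j₀ c₀ rest hrest
    · have hmem' : c₀.length ∈ rest := by
        cases hmem with
        | head => exact absurd rfl hLc
        | tail _ h => exact h
      rw [pvBestB]
      by_cases hLn : i + L ≤ n
      · rw [if_pos hLn]
        cases hg : pri.get? (String.ofList ((s.drop i).take L)) with
        | none => exact ih best hmem' hbest
        | some j =>
          obtain ⟨hle, heq⟩ := hC L j hLn hg
          have hnewgood : j₀ ≤ (j, String.ofList ((s.drop i).take L)).1 ∧
              ((j, String.ofList ((s.drop i).take L)).1 = j₀ →
                (j, String.ofList ((s.drop i).take L)) = (j₀, c₀)) := by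
            refine ⟨hle, fun h => ?_⟩
            have h' : j = j₀ := h
            rw [Prod.mk.injEq]
            exact ⟨h', heq h'⟩
          rcases hbest with rfl | ⟨b, rfl, hble, hbeq⟩
          · dsimp only
            exact ih _ hmem' (Or.inr ⟨_, rfl, hnewgood⟩)
          · dsimp only
            by_cases hlt : j < b.1
            · rw [if_pos hlt]
              exact ih _ hmem' (Or.inr ⟨_, rfl, hnewgood⟩)
            · rw [if_neg hlt]
              exact ih _ hmem' (Or.inr ⟨b, rfl, hble, hbeq⟩)
      · rw [if_neg hLn]
        exact ih best hmem' hbest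

-- no candidate at all
theorem pvBestB_none (pri : PySem.Dict String Nat) (s : List Char) (n i : Nat)
    (hC : ∀ L, i + L ≤ n → pri.get? (String.ofList ((s.drop i).take L)) = none) :
    ∀ ls, pvBestB pri s n i ls none = none := by
  intro ls
  induction ls with
  | nil => rfl
  | cons L rest ih =>
    rw [pvBestB]
    by_cases hLn : i + L ≤ n
    · rw [if_pos hLn, hC L hLn]
      exact ih
    · rw [if_neg hLn]
      exact ih

-- ### the per-position step equivalence
theorem pvStep_eq (array1 : List String) (s : List Char) (i : Nat) (hi : i ≤ s.length) :
    (pvBestB (pvBuildPri array1 0 PySem.Dict.empty) s s.length i (pvLengths array1) none).map Prod.snd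
      = pvFindA s i array1 := by
  rw [pvFindA_eq_findIdx?]
  cases hfi : array1.findIdx? (pvMatchP s i) with
  | none =>
    have hnom : ∀ t ∈ array1, pvMatchP s i t = false := List.findIdx?_eq_none_iff.mp hfi
    have hnone : pvBestB (pvBuildPri array1 0 PySem.Dict.empty) s s.length i (pvLengths array1) none = none := by
      apply pvBestB_none
      intro L hLn
      rw [pvPri_get?, List.findIdx?_eq_none_iff]
      intro t ht
      by_cases h : t = String.ofList ((s.drop i).take L)
      · have hm := hnom t ht
        rw [h, pvSlice_match hLn] at hm
        simp at hm
      · simpa using h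
    rw [hnone]
    rfl
  | some j₀ =>
    obtain ⟨hj₀, hpj₀, hmin⟩ := pvFindIdx?_spec hfi
    set c₀ := array1[j₀]'hj₀ with hc₀
    have hgetc₀ : array1[j₀]? = some c₀ := List.getElem?_eq_getElem hj₀
    have hpriC : ∀ (c : String) (j : Nat),
        (pvBuildPri array1 0 PySem.Dict.empty).get? c = some j →
        ∃ hjl : j < array1.length, array1[j]'hjl = c ∧ ∀ k (hk : k < j), array1[k]'(hk.trans hjl) ≠ c := by
      intro c j hg
      rw [pvPri_get?] at hg
      obtain ⟨hjl, hpj, hmink⟩ := pvFindIdx?_spec hg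
      exact ⟨hjl, by simpa using hpj, fun k hk => by simpa using hmink k hk⟩
    -- candidate soundness: every candidate has index ≥ j₀, with equality only for c₀ itself
    have hCS : ∀ L j, i + L ≤ s.length →
        (pvBuildPri array1 0 PySem.Dict.empty).get? (String.ofList ((s.drop i).take L)) = some j →
        j₀ ≤ j ∧ (j = j₀ → String.ofList ((s.drop i).take L) = c₀) := by
      intro L j hLn hg
      obtain ⟨hjl, hje, _⟩ := hpriC _ _ hg
      have hpm : pvMatchP s i (array1[j]'hjl) = true := by
        rw [hje]
        exact pvSlice_match hLn
      have hle : j₀ ≤ j := by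
        by_contra hlt
        have hm := hmin j (Nat.lt_of_not_le (fun h => hlt h))
        rw [hpm] at hm
        simp at hm
      refine ⟨hle, fun hjj => ?_⟩
      subst hjj
      rw [← hje]
    -- candidate existence at L = c₀.length
    obtain ⟨hguard, hsl⟩ := pvMatch_slice hi hpj₀
    have hmemL : c₀.length ∈ pvLengths array1 := by
      rw [pvLengths, PySem.List.mem_sorted, PySem.Set.mem_ofList]
      exact List.mem_map.mpr ⟨c₀, List.getElem_mem hj₀, rfl⟩
    have hcand : (pvBuildPri array1 0 PySem.Dict.empty).get? (String.ofList ((s.drop i).take c₀.length)) = some j₀ := by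
      rw [hsl, pvPri_get?]
      have hex : array1.findIdx? (fun t => t == c₀) = some (array1.findIdx (fun t => t == c₀)) :=
        List.findIdx?_eq_some_of_exists ⟨c₀, List.getElem_mem hj₀, by simp⟩
      obtain ⟨hjl, hpj, hmink⟩ := pvFindIdx?_spec hex
      have hje : array1[array1.findIdx (fun t => t == c₀)]'hjl = c₀ := by simpa using hpj
      have h1 : array1.findIdx (fun t => t == c₀) ≤ j₀ := by
        by_contra hgt
        have hm := hmink j₀ (Nat.lt_of_not_le (fun h => hgt h))
        simp only [beq_eq_false_iff_ne] at hm
        exact absurd hc₀.symm hm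
      have h2 : j₀ ≤ array1.findIdx (fun t => t == c₀) := by
        by_contra hgt
        have hm := hmin _ (Nat.lt_of_not_le (fun h => hgt h))
        rw [hje] at hm
        rw [hpj₀] at hm
        simp at hm
      rw [hex]
      congr 1
      omega
    rw [pvBestB_min _ s s.length i j₀ c₀ hCS hguard hcand (pvLengths array1) none hmemL (Or.inl rfl)]
    simp [hgetc₀]

-- ### the loops agree
theorem pvLoop_eq (array1 : List String) (s : List Char) :
    ∀ fuel i, pvLoopA array1 s fuel i
      = pvLoopB (pvBuildPri array1 0 PySem.Dict.empty) (pvLengths array1) s fuel i := by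
  intro fuel
  induction fuel with
  | zero => intro i; rfl
  | succ fuel ih =>
    intro i
    rw [pvLoopA, pvLoopB]
    by_cases hi : i < s.length
    · rw [if_pos hi, if_pos hi]
      have hstep := pvStep_eq array1 s i (Nat.le_of_lt hi)
      cases hb : pvBestB (pvBuildPri array1 0 PySem.Dict.empty) s s.length i (pvLengths array1) none with
      | none =>
        rw [hb] at hstep
        simp only [Option.map_none] at hstep
        rw [← hstep]
        dsimp only
        rw [ih]
      | some b =>
        rw [hb] at hstep
        simp only [Option.map_some] at hstep
        rw [← hstep]
        dsimp only
        rw [ih]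
    · rw [if_neg hi, if_neg hi]

-- ===== VERDICT (by name: the statement is the Claim_ definition above) =====
theorem partition_spec : Claim_equal_partition := by
  intro array1 string1 _
  unfold Spec_partition partition partition_alt
  exact pvLoop_eq array1 pvInput2 pvInput2.length 0
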